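-- pv_equiv track=rewrite | github.com/HwangToeMat/Algorithm | 프로그래머스/DP/N으로표현.py | solution
-- ===== SOURCE A (Python) =====
-- def solution(N, number):
--     lst = [set([N])]
--     if N == number:
--         return 1
--     for n in range(1, 8):
--         lst.append(set())
--         lst[n].add(int(str(N)*(n+1)))
--         kk = n+1//2
--         for u in range(kk):
--             for i in lst[0+u]:
--                 for _ in lst[n-1-u]:
--                     lst[n].add(_+i)
--                     lst[n].add(_-i)
--                     lst[n].add(i-_)
--                     lst[n].add(_*i)
--                     if i != 0:
--                         lst[n].add(_//i)
--                     if _ != 0: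
--                         lst[n].add(N//_)
--                     if number in lst[n]:
--                         return n + 1
--     return -1
-- ===== SOURCE B (Python) =====
-- def solution(N, number):
--     if N == number:
--         return 1
--     memo = {0: {N}}
--
--     def reach(k):
--         # set of values expressible with exactly k+1 copies of N
--         if k not in memo:
--             s = {int(str(N) * (k + 1))}
--             for u in range(k):
--                 left = reach(u)
--                 right = reach(k - 1 - u)
--                 for i in left:
--                     for v in right:
--                         s.update((v + i, v - i, i - v, v * i))
--                         if i != 0:
--                             s.add(v // i)
--                         if v != 0:
--                             s.add(N // v)
--             memo[k] = s
--         return memo[k]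
--
--     for k in range(1, 8):
--         if number in reach(k):
--             return k + 1
--     return -1
-- ===== Notes on version B (the rewrite author's own statement) =====
-- stated objective: alternative
-- what changed: A's imperative list-of-sets builder with an early return buried inside the innermost loop is replaced by a top-down memoized recursion reach(k) computing the set of values expressible with k+1 copies of N, with membership tested once per fully built level.
import Mathlib
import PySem

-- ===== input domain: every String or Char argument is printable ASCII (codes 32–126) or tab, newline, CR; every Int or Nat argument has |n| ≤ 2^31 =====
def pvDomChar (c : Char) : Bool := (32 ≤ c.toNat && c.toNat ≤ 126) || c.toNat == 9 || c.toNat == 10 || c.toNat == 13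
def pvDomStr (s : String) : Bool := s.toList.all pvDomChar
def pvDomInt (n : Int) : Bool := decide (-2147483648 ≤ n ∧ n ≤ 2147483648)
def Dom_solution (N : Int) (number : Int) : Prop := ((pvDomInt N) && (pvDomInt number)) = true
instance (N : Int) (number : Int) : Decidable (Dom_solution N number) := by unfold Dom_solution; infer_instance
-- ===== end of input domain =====

-- B replaces A's imperative list-of-sets builder with an early return buried in the innermost
-- loop by a top-down memoized recursion computing the set reachable with k+1 copies of N, testing
-- membership once per fully built level (objective: alternative; same values, similar cost).
--
-- Python's `set` is ported in both programs as PvMSet: the PySem.Set list of its elements in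
-- first-insertion order PAIRED with a Std.HashSet mirror of the same elements that answers the
-- O(1) membership queries CPython's hash table answers.  The list component is proved equal to
-- the plain PySem.Set computation (pvAdd_lift and the pv*P twins below the claim block), so no
-- step computes anything by other means; iteration always reads the list component.
abbrev PvMSet := PySem.Set Int × Std.HashSet Int
def pvEmpty : PvMSet := ([], ∅)
def pvAdd (m : PvMSet) (x : Int) : PvMSet :=
  if m.2.contains x then m else (m.1 ++ [x], m.2.insert x)

-- ===== PORT A =====
-- int(str(N)*k); shared by both ports (both Pythons contain this exact expression).
-- The `.getD 0` is reached only for N < 0, where Python raises ValueError — excluded by Pre_.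
def pvSeed (N k : Int) : Int :=
  (PySem.Int.ofChars? (PySem.List.pyRepeat (PySem.Int.toChars N) k)).getD 0

-- body of A's innermost loop; the Python `return n + 1` is modelled by an Option component that,
-- once set, makes every later iteration a no-op (value-equivalent to exiting the loops).
def stepA (N number n : Int) (st : PvMSet × Option Int) (i v : Int) :
    PvMSet × Option Int :=
  match st.2 with
  | some _ => st
  | none =>
    let s := pvAdd st.1 (v + i)
    let s := pvAdd s (v - i)
    let s := pvAdd s (i - v)
    let s := pvAdd s (v * i)
    let s := if i ≠ 0 then pvAdd s (PySem.Int.floordiv v i) else s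
    let s := if v ≠ 0 then pvAdd s (PySem.Int.floordiv N v) else s
    (s, if s.2.contains number then some (n + 1) else none)

-- one iteration of A's outer `for n in range(1, 8)`: the in-place mutation of the freshly
-- appended set lst[n] (never read by the inner loops) is threaded as the first component.
def levelA (N number : Int) (lst : List PvMSet) (n : Int) : PvMSet × Option Int :=
  let s0 := pvAdd pvEmpty (pvSeed N (n + 1))
  let kk := n + PySem.Int.floordiv 1 2
  (PySem.List.pyRange 0 kk 1).foldl (fun st u =>
    (PySem.List.pyGetD lst (0 + u) pvEmpty).1.foldl (fun st i =>
      (PySem.List.pyGetD lst (n - 1 - u) pvEmpty).1.foldl (fun st v =>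
        stepA N number n st i v) st) st) (s0, none)

def outStepA (N number : Int) (acc : List PvMSet × Option Int) (n : Int) :
    List PvMSet × Option Int :=
  match acc.2 with
  | some _ => acc
  | none =>
    let sr := levelA N number acc.1 n
    match sr.2 with
    | some r => (acc.1, some r)
    | none => (acc.1 ++ [sr.1], none)

def solution (N : Int) (number : Int) : Int :=
  let lst : List PvMSet := [pvAdd pvEmpty N]
  if N = number then 1
  else
    let fin := (PySem.List.pyRange 1 8 1).foldl (outStepA N number) (lst, none)
    match fin.2 with
    | some r => r
    | none => -1

-- ===== PORT B =====
-- body of B's innermost loop: s.update((v+i, v-i, i-v, v*i)) then the two guarded adds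
def pairAddB (N : Int) (s : PvMSet) (i v : Int) : PvMSet :=
  let s := pvAdd (pvAdd (pvAdd (pvAdd s (v + i)) (v - i)) (i - v)) (v * i)
  let s := if i ≠ 0 then pvAdd s (PySem.Int.floordiv v i) else s
  if v ≠ 0 then pvAdd s (PySem.Int.floordiv N v) else s

-- Source B's `reach(k)`: the memo dict is a cache, so the port is the plain recursion it caches
def reachB (N : Int) : Nat → PvMSet
  | 0 => pvAdd pvEmpty N
  | k + 1 =>
    (List.range (k + 1)).attach.foldl
      (fun s u =>
        let left := reachB N u.1
        let right := reachB N (k - u.1)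
        left.1.foldl (fun s i => right.1.foldl (fun s v => pairAddB N s i v) s) s)
      (pvAdd pvEmpty (pvSeed N ((k : Int) + 2)))
  decreasing_by
  all_goals have := List.mem_range.mp u.2; omega

def searchB (N number : Int) : List Int → Int
  | [] => -1
  | k :: rest =>
    if (reachB N k.toNat).2.contains number then k + 1
    else searchB N number rest

def solution_alt (N : Int) (number : Int) : Int :=
  if N = number then 1 else searchB N number (PySem.List.pyRange 1 8 1)

-- ===== PRECONDITION & SPEC =====
-- A raises ValueError (int('-3-3')) as soon as it builds the two-copy concatenation of a
-- negative N, i.e. whenever N < 0 and N ≠ number; exactly those inputs are excluded.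
def Pre_solution (N : Int) (number : Int) : Prop := 0 ≤ N ∨ N = number
instance (N : Int) (number : Int) : Decidable (Pre_solution N number) := by
  unfold Pre_solution; infer_instance
def pvWitness_solution : Int × Int := (2, 11)

def Spec_solution (N : Int) (number : Int) (out : Int) : Prop := out = solution_alt N number
instance (N : Int) (number : Int) (out : Int) : Decidable (Spec_solution N number out) := by
  unfold Spec_solution; infer_instance

-- ===== CLAIM (what is proved, stated in full; the proofs are below) =====
def Claim_equal_solution : Prop := ∀ (N : Int) (number : Int),
  Dom_solution N number → Pre_solution N number → Spec_solution N number (solution N number)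

-- ===== LEMMAS AND PROOFS =====

-- ---- plain (list-only) twins of the two ports, used solely inside the proofs ----
def stepP (N number n : Int) (st : PySem.Set Int × Option Int) (i v : Int) :
    PySem.Set Int × Option Int :=
  match st.2 with
  | some _ => st
  | none =>
    let s := PySem.Set.add st.1 (v + i)
    let s := PySem.Set.add s (v - i)
    let s := PySem.Set.add s (i - v)
    let s := PySem.Set.add s (v * i)
    let s := if i ≠ 0 then PySem.Set.add s (PySem.Int.floordiv v i) else s
    let s := if v ≠ 0 then PySem.Set.add s (PySem.Int.floordiv N v) else s
    (s, if PySem.Set.contains s number then some (n + 1) else none)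

def levelP (N number : Int) (lst : List (PySem.Set Int)) (n : Int) :
    PySem.Set Int × Option Int :=
  let s0 := PySem.Set.add (PySem.Set.empty : PySem.Set Int) (pvSeed N (n + 1))
  let kk := n + PySem.Int.floordiv 1 2
  (PySem.List.pyRange 0 kk 1).foldl (fun st u =>
    (PySem.List.pyGetD lst (0 + u) PySem.Set.empty).foldl (fun st i =>
      (PySem.List.pyGetD lst (n - 1 - u) PySem.Set.empty).foldl (fun st v =>
        stepP N number n st i v) st) st) (s0, none)

def outStepP (N number : Int) (acc : List (PySem.Set Int) × Option Int) (n : Int) :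
    List (PySem.Set Int) × Option Int :=
  match acc.2 with
  | some _ => acc
  | none =>
    let sr := levelP N number acc.1 n
    match sr.2 with
    | some r => (acc.1, some r)
    | none => (acc.1 ++ [sr.1], none)

def pairAddP (N : Int) (s : PySem.Set Int) (i v : Int) : PySem.Set Int :=
  let s := PySem.Set.add (PySem.Set.add (PySem.Set.add (PySem.Set.add s (v + i)) (v - i)) (i - v)) (v * i)
  let s := if i ≠ 0 then PySem.Set.add s (PySem.Int.floordiv v i) else s
  if v ≠ 0 then PySem.Set.add s (PySem.Int.floordiv N v) else s

def reachP (N : Int) : Nat → PySem.Set Int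
  | 0 => PySem.Set.ofList [N]
  | k + 1 =>
    (List.range (k + 1)).attach.foldl
      (fun s u =>
        let left := reachP N u.1
        let right := reachP N (k - u.1)
        left.foldl (fun s i => right.foldl (fun s v => pairAddP N s i v) s) s)
      (PySem.Set.ofList [pvSeed N ((k : Int) + 2)])
  decreasing_by
  all_goals have := List.mem_range.mp u.2; omega

def searchP (N number : Int) : List Int → Int
  | [] => -1
  | k :: rest =>
    if PySem.Set.contains (reachP N k.toNat) number then k + 1
    else searchP N number rest

-- ---- the mirror invariant: the HashSet component answers exactly the list's membership ----
def PvInv (m : PvMSet) : Prop := ∀ x : Int, m.2.contains x = PySem.Set.contains m.1 x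

lemma pvInv_empty : PvInv pvEmpty := by
  intro x
  simp [pvEmpty, PySem.Set.contains_eq_listContains]

lemma pvAdd_lift {m : PvMSet} (h : PvInv m) (x : Int) :
    (pvAdd m x).1 = PySem.Set.add m.1 x ∧ PvInv (pvAdd m x) := by
  by_cases hx : x ∈ m.1
  · have hc : m.2.contains x = true := by
      rw [h x]; exact (PySem.Set.contains_iff _ _).mpr hx
    simp only [pvAdd, hc, if_true]
    exact ⟨(PySem.Set.add_of_mem hx).symm, h⟩
  · have hc : m.2.contains x = false := by
      rw [h x, Bool.eq_false_iff]
      intro hcc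
      exact hx ((PySem.Set.contains_iff _ _).mp hcc)
    simp only [pvAdd, hc, Bool.false_eq_true, if_false]
    refine ⟨(PySem.Set.add_of_not_mem hx).symm, ?_⟩
    intro y
    by_cases hyx : y = x
    · subst hyx
      simp [Std.HashSet.contains_insert, PySem.Set.contains_eq_listContains]
    · have hxy : ¬ x = y := fun hh => hyx hh.symm
      simp [Std.HashSet.contains_insert, hxy, h y, PySem.Set.contains_eq_listContains, hyx]

-- one generic lift: a fold in the mirrored world projects to the fold in the plain world
lemma foldl_lift {σm σ α : Type} (R : σm → σ → Prop) (F : σm → α → σm) (f : σ → α → σ)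
    (hF : ∀ m s a, R m s → R (F m a) (f s a)) :
    ∀ (l : List α) (m : σm) (s : σ), R m s → R (l.foldl F m) (l.foldl f s) := by
  intro l
  induction l with
  | nil => intro m s h; exact h
  | cons a t ih => intro m s h; exact ih _ _ (hF m s a h)

def RSet (m : PvMSet) (s : PySem.Set Int) : Prop := m.1 = s ∧ PvInv m

lemma RSet_add {m s x} (h : RSet m s) : RSet (pvAdd m x) (PySem.Set.add s x) := by
  obtain ⟨he, hi⟩ := h
  obtain ⟨h1, h2⟩ := pvAdd_lift hi x
  exact ⟨by rw [h1, he], h2⟩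

lemma pairAddB_lift {m s} (N i v : Int) (h : RSet m s) :
    RSet (pairAddB N m i v) (pairAddP N s i v) := by
  simp only [pairAddB, pairAddP]
  split_ifs <;>
    first
      | exact RSet_add (RSet_add (RSet_add (RSet_add (RSet_add (RSet_add h)))))
      | exact RSet_add (RSet_add (RSet_add (RSet_add (RSet_add h))))
      | exact RSet_add (RSet_add (RSet_add (RSet_add h)))

def RSt (st : PvMSet × Option Int) (pt : PySem.Set Int × Option Int) : Prop :=
  pt = (st.1.1, st.2) ∧ PvInv st.1

lemma stepA_lift {st pt} (N number n i v : Int) (h : RSt st pt) :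
    RSt (stepA N number n st i v) (stepP N number n pt i v) := by
  obtain ⟨he, hi⟩ := h
  obtain ⟨m, o⟩ := st
  subst he
  cases o with
  | some r => exact ⟨rfl, hi⟩
  | none =>
    have hp : RSet (pairAddB N m i v) (pairAddP N m.1 i v) := pairAddB_lift N i v ⟨rfl, hi⟩
    have hs : stepA N number n (m, none) i v =
        (pairAddB N m i v,
         if (pairAddB N m i v).2.contains number then some (n + 1) else none) := rfl
    have hsp : stepP N number n (m.1, none) i v =
        (pairAddP N m.1 i v,
         if PySem.Set.contains (pairAddP N m.1 i v) number then some (n + 1) else none) := rfl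
    rw [hs, hsp]
    obtain ⟨he', hi'⟩ := hp
    refine ⟨?_, hi'⟩
    rw [← he', hi' number]

lemma levelA_lift (N number n : Int) (lst : List PvMSet) :
    RSt (levelA N number lst n) (levelP N number (lst.map (·.1)) n) := by
  simp only [levelA, levelP]
  have h0 : RSt (pvAdd pvEmpty (pvSeed N (n + 1)), none)
      (PySem.Set.add (PySem.Set.empty : PySem.Set Int) (pvSeed N (n + 1)), none) := by
    obtain ⟨h1, h2⟩ := pvAdd_lift pvInv_empty (pvSeed N (n + 1))
    exact ⟨by rw [h1]; rfl, h2⟩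
  refine foldl_lift RSt _ _ (fun st pt u h => ?_) _ _ _ h0
  have hget : ∀ (idx : Int),
      PySem.List.pyGetD (lst.map (·.1)) idx (PySem.Set.empty : PySem.Set Int) =
        (PySem.List.pyGetD lst idx pvEmpty).1 :=
    fun idx => PySem.List.pyGetD_map (·.1) lst idx pvEmpty
  rw [hget (0 + u), hget (n - 1 - u)]
  refine foldl_lift RSt _ _ (fun st pt i h => ?_) _ _ _ h
  exact foldl_lift RSt _ _ (fun st pt v h => stepA_lift N number n i v h) _ _ _ h

def ROut (acc : List PvMSet × Option Int) (pacc : List (PySem.Set Int) × Option Int) : Prop :=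
  pacc = (acc.1.map (·.1), acc.2)

lemma outStepA_lift {acc pacc} (N number n : Int) (h : ROut acc pacc) :
    ROut (outStepA N number acc n) (outStepP N number pacc n) := by
  obtain ⟨lst, o⟩ := acc
  subst h
  cases o with
  | some r => rfl
  | none =>
    have hl := levelA_lift N number n lst
    obtain ⟨he, _⟩ := hl
    simp only [outStepA, outStepP, he]
    cases hx : (levelA N number lst n).2 with
    | some r => rfl
    | none => simp [ROut]

lemma reachP_zero (N : Int) : reachP N 0 = PySem.Set.ofList [N] := by rw [reachP]

lemma reachB_lift (N : Int) : ∀ (k : Nat), RSet (reachB N k) (reachP N k) := by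
  intro k
  induction k using Nat.strong_induction_on with
  | _ k ih =>
    match k with
    | 0 =>
      rw [reachB, reachP]
      obtain ⟨h1, h2⟩ := pvAdd_lift pvInv_empty N
      exact ⟨by rw [h1]; rfl, h2⟩
    | k + 1 =>
      rw [reachB, reachP]
      have h0 : RSet (pvAdd pvEmpty (pvSeed N ((k : Int) + 2)))
          (PySem.Set.ofList [pvSeed N ((k : Int) + 2)]) := by
        obtain ⟨h1, h2⟩ := pvAdd_lift pvInv_empty (pvSeed N ((k : Int) + 2))
        exact ⟨by rw [h1]; rfl, h2⟩
      refine foldl_lift RSet _ _ (fun m s u h => ?_) _ _ _ h0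
      have hu : u.1 < k + 1 := List.mem_range.mp u.2
      have hleft := ih u.1 (by omega)
      have hright := ih (k - u.1) (by omega)
      obtain ⟨hle, _⟩ := hleft
      obtain ⟨hre, _⟩ := hright
      simp only [← hle, ← hre]
      refine foldl_lift RSet _ _ (fun m s i h => ?_) _ _ _ h
      exact foldl_lift RSet _ _ (fun m s v h => pairAddB_lift N i v h) _ _ _ h

lemma searchB_lift (N number : Int) : ∀ (l : List Int),
    searchB N number l = searchP N number l := by
  intro l
  induction l with
  | nil => rfl
  | cons k rest ih =>
    obtain ⟨he, hi⟩ := reachB_lift N k.toNat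
    simp only [searchB, searchP, hi number, he, ih]

-- ---- equivalence of the two plain programs ----

-- the flattened list of (i, v) pairs the inner loops of both programs traverse at level n
def pairsF (N : Int) (n : Nat) : List (Int × Int) :=
  (List.range n).flatMap (fun u =>
    (reachP N u).flatMap (fun i => (reachP N (n - 1 - u)).map (fun v => (i, v))))

lemma pairAddP_mono {N i v x : Int} {s : PySem.Set Int} (h : x ∈ s) : x ∈ pairAddP N s i v := by
  simp only [pairAddP]
  split_ifs <;> simp [PySem.Set.mem_add, h]

lemma foldl_pairAddP_mono (N : Int) (l : List (Int × Int)) {s : PySem.Set Int} {x : Int}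
    (h : x ∈ s) : x ∈ l.foldl (fun s p => pairAddP N s p.1 p.2) s := by
  induction l generalizing s with
  | nil => exact h
  | cons p t ih => exact ih (pairAddP_mono h)

lemma stepP_sticky (N number n : Int) (l : List (Int × Int)) (s : PySem.Set Int) (r : Int) :
    l.foldl (fun st p => stepP N number n st p.1 p.2) (s, some r) = (s, some r) := by
  induction l with
  | nil => rfl
  | cons p t ih => simpa [stepP] using ih

lemma stepP_none (N number n : Int) (s : PySem.Set Int) (i v : Int) :
    stepP N number n (s, none) i v =
      (pairAddP N s i v,
       if PySem.Set.contains (pairAddP N s i v) number then some (n + 1) else none) := rfl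

lemma flat_spec (N number n : Int) :
    ∀ (l : List (Int × Int)), l ≠ [] → ∀ (s0 : PySem.Set Int),
      (number ∈ l.foldl (fun s p => pairAddP N s p.1 p.2) s0 →
          (l.foldl (fun st p => stepP N number n st p.1 p.2) (s0, none)).2 = some (n + 1)) ∧
      (number ∉ l.foldl (fun s p => pairAddP N s p.1 p.2) s0 →
          l.foldl (fun st p => stepP N number n st p.1 p.2) (s0, none) =
            (l.foldl (fun s p => pairAddP N s p.1 p.2) s0, none)) := by
  intro l
  induction l with
  | nil => intro h; exact absurd rfl h
  | cons p t ih =>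
    intro _ s0
    by_cases hm : number ∈ pairAddP N s0 p.1 p.2
    · have hc : PySem.Set.contains (pairAddP N s0 p.1 p.2) number = true :=
        (PySem.Set.contains_iff _ _).mpr hm
      have hfull : number ∈ t.foldl (fun s p => pairAddP N s p.1 p.2) (pairAddP N s0 p.1 p.2) :=
        foldl_pairAddP_mono N t hm
      constructor
      · intro _
        simp only [List.foldl_cons, stepP_none, hc, if_pos]
        rw [stepP_sticky]
      · intro hnot
        exact absurd hfull hnot
    · have hc : PySem.Set.contains (pairAddP N s0 p.1 p.2) number = false := by
        rw [Bool.eq_false_iff]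
        intro h
        exact hm ((PySem.Set.contains_iff _ _).mp h)
      cases t with
      | nil =>
        constructor
        · intro hmem
          exact absurd hmem hm
        · intro _
          simp only [List.foldl_cons, List.foldl_nil, stepP_none, hc]
          rfl
      | cons q r =>
        have := ih (List.cons_ne_nil q r) (pairAddP N s0 p.1 p.2)
        constructor
        · intro hmem
          simp only [List.foldl_cons] at hmem ⊢
          rw [stepP_none, hc]
          exact this.1 hmem
        · intro hnot
          simp only [List.foldl_cons] at hnot ⊢
          rw [stepP_none, hc]
          exact this.2 hnot

lemma reachP_flat (N : Int) (k : Nat) :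
    reachP N (k + 1) =
      (pairsF N (k + 1)).foldl (fun s p => pairAddP N s p.1 p.2)
        (PySem.Set.ofList [pvSeed N ((k : Int) + 2)]) := by
  rw [reachP, List.foldl_attach (f := fun s u => List.foldl
    (fun s i => List.foldl (fun s v => pairAddP N s i v) s (reachP N (k - u))) s (reachP N u))]
  unfold pairsF
  simp only [List.foldl_flatMap, List.foldl_map, Nat.add_sub_cancel]

lemma reachP_ne_nil (N : Int) (k : Nat) : reachP N k ≠ [] := by
  cases k with
  | zero =>
    rw [reachP]
    exact List.ne_nil_of_mem ((PySem.Set.mem_ofList _ _).mpr (List.mem_singleton.mpr rfl))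
  | succ k =>
    rw [reachP_flat]
    exact List.ne_nil_of_mem (foldl_pairAddP_mono N _
      ((PySem.Set.mem_ofList _ _).mpr (List.mem_singleton.mpr rfl)))

lemma pairsF_ne_nil (N : Int) (n : Nat) (hn : 1 ≤ n) : pairsF N n ≠ [] := by
  obtain ⟨v, hv⟩ := List.exists_mem_of_ne_nil _ (reachP_ne_nil N (n - 1))
  refine List.ne_nil_of_mem (a := (N, v)) ?_
  unfold pairsF
  refine List.mem_flatMap.mpr ⟨0, by simpa using hn, ?_⟩
  refine List.mem_flatMap.mpr ⟨N, ?_, ?_⟩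
  · rw [reachP]
    exact (PySem.Set.mem_ofList _ _).mpr (List.mem_singleton.mpr rfl)
  · exact List.mem_map.mpr ⟨v, by simpa using hv, rfl⟩

lemma addEmpty (x : Int) :
    PySem.Set.add (PySem.Set.empty : PySem.Set Int) x = PySem.Set.ofList [x] := rfl

lemma levelP_flat (N number : Int) (n : Nat) :
    levelP N number ((List.range n).map (reachP N)) (n : Int) =
      (pairsF N n).foldl (fun st p => stepP N number (n : Int) st p.1 p.2)
        (PySem.Set.add (PySem.Set.empty : PySem.Set Int) (pvSeed N ((n : Int) + 1)), none) := by
  have hfd : PySem.Int.floordiv 1 2 = 0 := by decide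
  simp only [levelP, hfd, add_zero]
  rw [PySem.List.pyRange_zero_nat, List.foldl_map]
  unfold pairsF
  simp only [List.foldl_flatMap, List.foldl_map]
  refine PySem.List.foldl_congr_mem _ _ _ _ (fun st u hu => ?_)
  have hun : u < n := List.mem_range.mp hu
  have h1 : PySem.List.pyGetD ((List.range n).map (reachP N)) (0 + (u : Int)) PySem.Set.empty
      = reachP N u := by
    rw [zero_add, PySem.List.pyGetD_natCast]
    simp [List.getD_eq_getElem?_getD, hun]
  have h2 : PySem.List.pyGetD ((List.range n).map (reachP N)) ((n : Int) - 1 - (u : Int))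
      PySem.Set.empty = reachP N (n - 1 - u) := by
    have hc : (n : Int) - 1 - (u : Int) = ((n - 1 - u : Nat) : Int) := by omega
    rw [hc, PySem.List.pyGetD_natCast]
    have : n - 1 - u < n := by omega
    simp [List.getD_eq_getElem?_getD, this]
  rw [h1, h2]

lemma level_spec (N number : Int) (n : Nat) (hn : 1 ≤ n) :
    (number ∈ reachP N n →
        (levelP N number ((List.range n).map (reachP N)) (n : Int)).2 = some ((n : Int) + 1)) ∧
    (number ∉ reachP N n →
        levelP N number ((List.range n).map (reachP N)) (n : Int) = (reachP N n, none)) := by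
  obtain ⟨k, rfl⟩ : ∃ k, n = k + 1 := ⟨n - 1, by omega⟩
  have hcast : ((k + 1 : Nat) : Int) + 1 = (k : Int) + 2 := by push_cast; ring
  rw [levelP_flat, reachP_flat, addEmpty, hcast]
  exact flat_spec N number ((k + 1 : Nat) : Int) (pairsF N (k + 1))
    (pairsF_ne_nil N (k + 1) (by omega)) (PySem.Set.ofList [pvSeed N ((k : Int) + 2)])

lemma outStepP_sticky (N number : Int) (l : List Int) (lst : List (PySem.Set Int)) (r : Int) :
    l.foldl (outStepP N number) (lst, some r) = (lst, some r) := by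
  induction l with
  | nil => rfl
  | cons p t ih => simpa [outStepP] using ih

lemma outer_eq (N number : Int) : ∀ (j n : Nat), 1 ≤ n →
    (match ((PySem.List.pyRange (n : Int) ((n : Int) + (j : Int)) 1).foldl (outStepP N number)
        ((List.range n).map (reachP N), none)).2 with
     | some r => r
     | none => -1) =
      searchP N number (PySem.List.pyRange (n : Int) ((n : Int) + (j : Int)) 1) := by
  intro j
  induction j with
  | zero =>
    intro n hn
    rw [show ((n : Int) + ((0 : Nat) : Int)) = (n : Int) by push_cast; ring,
      PySem.List.pyRange_one_eq_nil (le_refl _)]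
    rfl
  | succ j ih =>
    intro n hn
    have hcons : PySem.List.pyRange (n : Int) ((n : Int) + ((j + 1 : Nat) : Int)) 1
        = (n : Int) :: PySem.List.pyRange ((n : Int) + 1) ((n : Int) + ((j + 1 : Nat) : Int)) 1 :=
      PySem.List.pyRange_one_cons (by push_cast; omega)
    rw [hcons]
    by_cases hm : number ∈ reachP N n
    · have h2 := (level_spec N number n hn).1 hm
      have hstep : outStepP N number ((List.range n).map (reachP N), none) (n : Int)
          = ((List.range n).map (reachP N), some ((n : Int) + 1)) := by
        simp only [outStepP, h2]
      simp only [List.foldl_cons, hstep, outStepP_sticky]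
      have hcontains : PySem.Set.contains (reachP N n) number = true :=
        (PySem.Set.contains_iff _ _).mpr hm
      simp only [searchP, Int.toNat_natCast]
      rw [if_pos hcontains]
    · have h2 := (level_spec N number n hn).2 hm
      have hstep : outStepP N number ((List.range n).map (reachP N), none) (n : Int)
          = ((List.range (n + 1)).map (reachP N), none) := by
        simp only [outStepP, h2, List.range_succ, List.map_append, List.map_cons, List.map_nil]
      have hcontains : PySem.Set.contains (reachP N n) number = false := by
        rw [Bool.eq_false_iff]
        intro h
        exact hm ((PySem.Set.contains_iff _ _).mp h)
      simp only [List.foldl_cons, hstep, searchP, Int.toNat_natCast, hcontains,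
        Bool.false_eq_true, if_false]
      have hb : (n : Int) + ((j + 1 : Nat) : Int) = ((n + 1 : Nat) : Int) + ((j : Nat) : Int) := by
        push_cast; ring
      have ha : (n : Int) + 1 = ((n + 1 : Nat) : Int) := by push_cast; ring
      rw [hb, ha]
      exact ih (n + 1) (by omega)

-- ===== VERDICT (by name: the statement is the Claim_ definition above) =====
theorem solution_spec : Claim_equal_solution := by
  intro N number _ _
  unfold Spec_solution
  by_cases h : N = number
  · simp [solution, solution_alt, h]
  · simp only [solution, solution_alt, if_neg h]
    -- lift the mirrored outer fold of port A to its plain twin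
    have hlift := foldl_lift ROut (outStepA N number) (outStepP N number)
      (fun acc pacc n hr => outStepA_lift N number n hr)
      (PySem.List.pyRange 1 8 1) ([pvAdd pvEmpty N], none)
      (([pvAdd pvEmpty N].map (fun m => m.1)), none) (by unfold ROut; rfl)
    have hsnd : ((PySem.List.pyRange 1 8 1).foldl (outStepP N number)
          (([pvAdd pvEmpty N].map (fun m => m.1)), none)).2
        = ((PySem.List.pyRange 1 8 1).foldl (outStepA N number) ([pvAdd pvEmpty N], none)).2 := by
      rw [hlift]
    have hinit : ([pvAdd pvEmpty N].map (fun m => m.1)) = (List.range 1).map (reachP N) := by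
      have h0 : reachP N 0 = PySem.Set.ofList [N] := reachP_zero N
      obtain ⟨h1, _⟩ := pvAdd_lift pvInv_empty N
      simp [List.range_one, h0, h1]
      rfl
    have H := outer_eq N number 7 1 (le_refl 1)
    norm_num at H
    rw [searchB_lift]
    rw [← hsnd, hinit]
    exact H
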